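-- pv_equiv track=rewrite | github.com/di-uni/problem-solving | programmers/brute force/check_모의고사.py | solution
-- ===== SOURCE A (Python) =====
-- def solution(answers):
--     answer = []
--     method1 = [1,2,3,4,5]
--     method2 = [2,1,2,3,2,4,2,5]
--     method3 = [3,3,1,1,2,2,4,4,5,5]
--
--     solve1 = 0
--     solve2 = 0
--     solve3 = 0
--
--     for i in range(len(answers)):
--         if method1[i % len(method1)] == answers[i]:
--             solve1 += 1
--         if method2[i % len(method2)] == answers[i]:
--             solve2 += 1
--         if method3[i % len(method3)] == answers[i]:
--             solve3 += 1
--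
--     max_solve = max(solve1, solve2, solve3)
--     if max_solve == solve1:
--         answer.append(1)
--     if max_solve == solve2:
--         answer.append(2)
--     if max_solve == solve3:
--         answer.append(3)
--
--     return answer
-- ===== SOURCE B (Python) =====
-- def solution(answers):
--     patterns = [[1, 2, 3, 4, 5],
--                 [2, 1, 2, 3, 2, 4, 2, 5],
--                 [3, 3, 1, 1, 2, 2, 4, 4, 5, 5]]
--     # Histogram pass: bucket answers by (position mod 40, value); 40 = lcm of the
--     # pattern periods, so a bucket determines every pattern's guess at that position.
--     cnt = {}
--     for i, a in enumerate(answers):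
--         key = (i % 40, a)
--         cnt[key] = cnt.get(key, 0) + 1
--     # Score each pattern from the histogram alone (no rescan of answers).
--     scores = [sum(cnt.get((r, p[r % len(p)]), 0) for r in range(40)) for p in patterns]
--     best = max(scores)
--     return [i + 1 for i, s in enumerate(scores) if s == best]
-- ===== Notes on version B (the rewrite author's own statement) =====
-- stated objective: alternative
-- what changed: A compares every answer against all three cyclic patterns in one combined loop; B instead builds a histogram keyed by (index mod 40, answer) in a single pattern-free pass (40 = lcm of the pattern periods), then computes each pattern's score purely from the 40 histogram buckets and selects the winners in one final pass.
import Mathlib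
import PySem

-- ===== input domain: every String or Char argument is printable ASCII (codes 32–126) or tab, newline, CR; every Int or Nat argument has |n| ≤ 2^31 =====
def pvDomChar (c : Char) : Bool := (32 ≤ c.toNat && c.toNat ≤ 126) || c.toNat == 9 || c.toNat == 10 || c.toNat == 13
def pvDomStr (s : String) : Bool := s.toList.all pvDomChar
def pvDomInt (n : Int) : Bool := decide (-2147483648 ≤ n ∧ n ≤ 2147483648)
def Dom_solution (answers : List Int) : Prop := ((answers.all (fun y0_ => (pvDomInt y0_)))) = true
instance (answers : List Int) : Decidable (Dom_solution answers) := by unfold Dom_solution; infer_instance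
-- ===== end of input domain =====

-- B replaces A's combined three-pattern scan by a pattern-free histogram pass keyed by
-- (index mod 40, answer) — 40 = lcm of the pattern periods — then scores each pattern from
-- the 40 buckets and selects the winners in one final pass (objective: alternative, same O(n)).

-- ===== PORT A =====
-- one combined loop over range(len(answers)) carrying the triple (solve1, solve2, solve3)
def solution (answers : List Int) : List Int :=
  let method1 : List Int := [1,2,3,4,5]
  let method2 : List Int := [2,1,2,3,2,4,2,5]
  let method3 : List Int := [3,3,1,1,2,2,4,4,5,5]
  let s := (PySem.List.pyRange 0 (answers.length : Int) 1).foldl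
    (fun (s : Int × Int × Int) (i : Int) =>
      let s1 := if PySem.List.pyGetD method1 (PySem.Int.mod i (method1.length : Int)) 0 == PySem.List.pyGetD answers i 0 then s.1 + 1 else s.1
      let s2 := if PySem.List.pyGetD method2 (PySem.Int.mod i (method2.length : Int)) 0 == PySem.List.pyGetD answers i 0 then s.2.1 + 1 else s.2.1
      let s3 := if PySem.List.pyGetD method3 (PySem.Int.mod i (method3.length : Int)) 0 == PySem.List.pyGetD answers i 0 then s.2.2 + 1 else s.2.2
      (s1, s2, s3)) (0, 0, 0)
  let maxSolve := max s.1 (max s.2.1 s.2.2)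
  let answer : List Int := []
  let answer := if maxSolve == s.1 then answer ++ [1] else answer
  let answer := if maxSolve == s.2.1 then answer ++ [2] else answer
  let answer := if maxSolve == s.2.2 then answer ++ [3] else answer
  answer

-- ===== PORT B =====
-- histogram pass: cnt[(i % 40, a)] += 1   (dict.get(key,0)+1 then store = insert)
def histB (answers : List Int) : PySem.Dict (Int × Int) Int :=
  (PySem.List.enumerate answers).foldl
    (fun (d : PySem.Dict (Int × Int) Int) (q : Int × Int) =>
      let key := (PySem.Int.mod q.1 40, q.2)
      d.insert key (d.getD key 0 + 1)) PySem.Dict.empty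

-- one pattern's score, read off the 40 buckets: sum(cnt.get((r, p[r % len(p)]), 0) for r in range(40))
def scoreB (cnt : PySem.Dict (Int × Int) Int) (p : List Int) : Int :=
  ((PySem.List.pyRange 0 40 1).map
    (fun r => cnt.getD (r, PySem.List.pyGetD p (PySem.Int.mod r (p.length : Int)) 0) 0)).sum

def solution_alt (answers : List Int) : List Int :=
  let patterns : List (List Int) := [[1,2,3,4,5], [2,1,2,3,2,4,2,5], [3,3,1,1,2,2,4,4,5,5]]
  let cnt := histB answers
  let scores := patterns.map (fun p => scoreB cnt p)
  let best := ((PySem.List.max? scores (fun y => y)).getD 0)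
  (PySem.List.enumerate scores).foldl
    (fun (acc : List Int) (q : Int × Int) => if q.2 == best then acc ++ [q.1 + 1] else acc) []

-- ===== PRECONDITION & SPEC =====
def Spec_solution (answers : List Int) (out : List Int) : Prop := out = solution_alt answers
instance (answers : List Int) (out : List Int) : Decidable (Spec_solution answers out) := by unfold Spec_solution; infer_instance

-- ===== CLAIM (what is proved, stated in full; the proofs are below) =====
def Claim_equal_solution : Prop := ∀ (answers : List Int), Dom_solution answers → Spec_solution answers (solution answers)

-- ===== LEMMAS AND PROOFS =====

-- the common count both programs compute for a pattern p
def matchN (p : List Int) (answers : List Int) : Int :=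
  ((PySem.List.enumerate answers).countP
    (fun q => PySem.List.pyGetD p (PySem.Int.mod q.1 (p.length : Int)) 0 == q.2) : Int)

-- A's combined fold over the triple splits into three independent folds
theorem foldl_triple_split (l : List Int) (f1 f2 f3 : Int → Bool) (a b c : Int) :
    l.foldl (fun (s : Int × Int × Int) (i : Int) =>
      ((if f1 i then s.1 + 1 else s.1),
       (if f2 i then s.2.1 + 1 else s.2.1),
       (if f3 i then s.2.2 + 1 else s.2.2))) (a, b, c)
    = (l.foldl (fun s i => if f1 i then s + 1 else s) a,
       l.foldl (fun s i => if f2 i then s + 1 else s) b,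
       l.foldl (fun s i => if f3 i then s + 1 else s) c) := by
  induction l generalizing a b c with
  | nil => rfl
  | cons x xs ih => simp only [List.foldl_cons]; exact ih _ _ _

-- A's per-pattern count over range equals matchN
theorem scoreA_eq (p : List Int) (answers : List Int) :
    (PySem.List.pyRange 0 (answers.length : Int) 1).foldl
      (fun (s : Int) (i : Int) =>
        if PySem.List.pyGetD p (PySem.Int.mod i (p.length : Int)) 0 == PySem.List.pyGetD answers i 0 then s + 1 else s) 0
    = matchN p answers := by
  rw [PySem.List.foldl_if_add_one]
  unfold matchN
  rw [PySem.List.enumerate_eq_map_pyRange (d := 0), List.countP_map, PySem.List.len_eq]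
  simp only [Function.comp_def, zero_add]

-- sum of a pair-indicator over a list x does not belong to is 0
theorem sum_ind_zero (R : List Int) (x v : Int) (g : Int → Int) (hx : x ∉ R) :
    (R.map (fun r => if (x, v) = (r, g r) then (1 : Int) else 0)).sum = 0 := by
  induction R with
  | nil => rfl
  | cons r R ih =>
    simp only [List.map_cons, List.sum_cons]
    rw [if_neg (by intro he; injection he with h1 h2; exact hx (h1 ▸ List.mem_cons_self ..)),
        ih (fun h => hx (List.mem_cons_of_mem _ h))]
    ring

-- sum of a pair-indicator over a Nodup list containing x
theorem sum_ind (R : List Int) (x v : Int) (g : Int → Int) (hnd : R.Nodup) (hx : x ∈ R) :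
    (R.map (fun r => if (x, v) = (r, g r) then (1 : Int) else 0)).sum
    = if v = g x then 1 else 0 := by
  induction R with
  | nil => cases hx
  | cons r R ih =>
    simp only [List.map_cons, List.sum_cons]
    rcases List.mem_cons.mp hx with h | h
    · subst h
      rw [sum_ind_zero _ _ _ _ (List.nodup_cons.mp hnd).1, add_zero]
      by_cases hv : v = g x
      · rw [if_pos (by rw [hv]), if_pos hv]
      · rw [if_neg (by intro he; injection he with h1 h2; exact hv h2), if_neg hv]
    · have hxr : x ≠ r := fun he => (List.nodup_cons.mp hnd).1 (he ▸ h)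
      rw [if_neg (by intro he; injection he with h1 h2; exact hxr h1), zero_add,
          ih (List.nodup_cons.mp hnd).2 h]

-- bucket sums over range(40) recombine into a single countP
theorem bucket_sum (g : Int → Int) (L : List (Int × Int))
    (h : ∀ q ∈ L, 0 ≤ q.1 ∧ q.1 < 40) :
    ((PySem.List.pyRange 0 40 1).map (fun r => (L.count (r, g r) : Int))).sum
    = (L.countP (fun q => g q.1 == q.2) : Int) := by
  induction L with
  | nil => simp
  | cons q L ih =>
    have hq := h q (List.mem_cons_self ..)
    have hrest : ∀ x ∈ L, 0 ≤ x.1 ∧ x.1 < 40 := fun x hx => h x (List.mem_cons_of_mem _ hx)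
    have hcc : ∀ r : Int, ((q :: L).count (r, g r) : Int)
        = (L.count (r, g r) : Int) + if (q.1, q.2) = (r, g r) then 1 else 0 := by
      intro r
      rw [List.count_cons]
      push_cast
      congr 1
      simp [beq_iff_eq]
    simp only [hcc]
    rw [PySem.List.sum_map_add_int, ih hrest,
        sum_ind _ _ _ _ (by decide)
          (by rw [PySem.List.mem_pyRange_one]; exact ⟨hq.1, hq.2⟩)]
    rw [List.countP_cons]
    by_cases hm : g q.1 = q.2
    · rw [if_pos hm.symm]; simp [hm]
    · rw [if_neg (fun he => hm he.symm)]; simp [beq_iff_eq, hm]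

-- B's histogram lookup is a count over the keyed list
theorem histB_getD (answers : List Int) (k : Int × Int) :
    (histB answers).getD k 0
    = (((PySem.List.enumerate answers).map
        (fun q => (PySem.Int.mod q.1 40, q.2))).count k : Int) := by
  have h : histB answers
      = ((PySem.List.enumerate answers).map
          (fun q : Int × Int => (PySem.Int.mod q.1 40, q.2))).foldl
          (fun (d : PySem.Dict (Int × Int) Int) (x : Int × Int) =>
            d.insert x (d.getD x 0 + 1)) PySem.Dict.empty := by
    unfold histB
    rw [List.foldl_map]
  rw [h, PySem.Dict.getD_foldl_insert_add_one]
  have he : (PySem.Dict.empty : PySem.Dict (Int × Int) Int).getD k 0 = 0 := rfl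
  rw [he, zero_add]

-- B's per-pattern score equals matchN (for patterns whose length divides 40)
theorem scoreB_eq (p : List Int) (answers : List Int)
    (hlen : 0 < p.length) (hdvd : (p.length : Int) ∣ 40) :
    scoreB (histB answers) p = matchN p answers := by
  unfold scoreB
  have hmem : ∀ q ∈ (PySem.List.enumerate answers).map
      (fun q : Int × Int => (PySem.Int.mod q.1 40, q.2)), 0 ≤ q.1 ∧ q.1 < 40 := by
    intro q hq
    rcases List.mem_map.mp hq with ⟨x, _, rfl⟩
    exact ⟨PySem.Int.mod_nonneg _ (by norm_num), PySem.Int.mod_lt _ (by norm_num)⟩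
  simp only [histB_getD]
  rw [bucket_sum (fun r => PySem.List.pyGetD p (PySem.Int.mod r (p.length : Int)) 0) _ hmem,
      List.countP_map]
  unfold matchN
  congr 1
  apply List.countP_congr
  intro q hq
  rcases (PySem.List.mem_enumerate_iff _ _ _).mp hq with ⟨k, hk, rfl⟩
  have h0 : (0 : Int) ≤ 0 + (k : Int) := by positivity
  have hmm : PySem.Int.mod (PySem.Int.mod (0 + (k : Int)) 40) (p.length : Int)
      = PySem.Int.mod (0 + (k : Int)) (p.length : Int) := by
    have h40 : (0 : Int) < 40 := by norm_num
    have hp : (0 : Int) < (p.length : Int) := by exact_mod_cast hlen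
    rw [PySem.Int.mod_eq_emod_of_pos h40, PySem.Int.mod_eq_emod_of_pos hp,
        PySem.Int.mod_eq_emod_of_pos hp]
    exact Int.emod_emod_of_dvd _ hdvd
  simp only [Function.comp_def]
  rw [hmm]

theorem solution_spec_aux (answers : List Int) : solution answers = solution_alt answers := by
  unfold solution solution_alt
  dsimp only
  rw [foldl_triple_split]
  simp only [scoreA_eq]
  simp only [List.map_cons, List.map_nil,
    scoreB_eq [1,2,3,4,5] answers (by decide) (by decide),
    scoreB_eq [2,1,2,3,2,4,2,5] answers (by decide) (by decide),
    scoreB_eq [3,3,1,1,2,2,4,4,5,5] answers (by decide) (by decide)]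
  set s1 := matchN [1,2,3,4,5] answers with hs1
  set s2 := matchN [2,1,2,3,2,4,2,5] answers with hs2
  set s3 := matchN [3,3,1,1,2,2,4,4,5,5] answers with hs3
  simp only [PySem.List.enumerate_cons, PySem.List.enumerate_nil, List.foldl_cons, List.foldl_nil,
    PySem.List.max?_id_cons, Option.getD_some, beq_iff_eq]
  split_ifs <;> first | rfl | (exfalso; omega)

-- ===== VERDICT (by name: the statement is the Claim_ definition above) =====
theorem solution_spec : Claim_equal_solution := by
  intro answers _
  unfold Spec_solution
  exact solution_spec_aux answers
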